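-- pv_equiv track=rewrite | github.com/przemyslaw-pawelczak/inUnity | sceptic/ScEpTIC/tools.py | split_parantheses_groups_with_context
-- ===== SOURCE A (Python) =====
-- def split_parantheses_groups_with_context(lst, lpar = '[', rpar = ']', start_token = '(', end_token = ')'):
--     """
--     Splits a list into different parentheses groups, but only if it is not inside a pair start_token - end_token.
--     """
--
--     new_list = []
--     sub_list = []
--
--     opened_par = 0
--     opened_tokens = 0
--
--     for i in range(0, len(lst)):
--         element = lst[i]
--         sub_list.append(element)
--
--         if element == start_token:
--             opened_tokens += 1
--         elif element == end_token:
--             opened_tokens -= 1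
--         elif element == lpar:
--             opened_par += 1
--         elif element == rpar:
--             opened_par -= 1
--
--             # on closing parenthesis, if no others are opened, split.
--             if opened_par == 0 and opened_tokens == 0:
--                 new_list.append(sub_list)
--                 sub_list = []
--
--     if len(sub_list) > 0:
--         new_list.append(sub_list)
--
--     return new_list
-- ===== SOURCE B (Python) =====
-- def split_parantheses_groups_with_context(lst, lpar = '[', rpar = ']', start_token = '(', end_token = ')'):
--     """
--     Splits a list into parentheses groups (ignoring those inside a start_token/end_token pair),
--     by repeatedly finding the first cut boundary and splitting the remainder there.
--     """
--
--     def first_cut(xs):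
--         # index just after the first rpar that brings the depth counters to (0, 0)
--         opened_par = 0
--         opened_tokens = 0
--         for i in range(0, len(xs)):
--             element = xs[i]
--             if element == start_token:
--                 opened_tokens += 1
--             elif element == end_token:
--                 opened_tokens -= 1
--             elif element == lpar:
--                 opened_par += 1
--             elif element == rpar:
--                 opened_par -= 1
--                 if opened_par == 0 and opened_tokens == 0:
--                     return i + 1
--         return None
--
--     groups = []
--     rest = lst
--     while rest:
--         k = first_cut(rest)
--         if k is None:
--             groups.append(rest)
--             break
--         groups.append(rest[:k])
--         rest = rest[k:]
--     return groups
-- ===== Notes on version B (the rewrite author's own statement) =====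
-- stated objective: alternative
-- what changed: A builds groups in one accumulating pass carrying a current sublist; B repeatedly scans for the first cut boundary (first_cut) and splits the remainder there by slicing, a find-boundary-then-split loop.
import Mathlib
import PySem

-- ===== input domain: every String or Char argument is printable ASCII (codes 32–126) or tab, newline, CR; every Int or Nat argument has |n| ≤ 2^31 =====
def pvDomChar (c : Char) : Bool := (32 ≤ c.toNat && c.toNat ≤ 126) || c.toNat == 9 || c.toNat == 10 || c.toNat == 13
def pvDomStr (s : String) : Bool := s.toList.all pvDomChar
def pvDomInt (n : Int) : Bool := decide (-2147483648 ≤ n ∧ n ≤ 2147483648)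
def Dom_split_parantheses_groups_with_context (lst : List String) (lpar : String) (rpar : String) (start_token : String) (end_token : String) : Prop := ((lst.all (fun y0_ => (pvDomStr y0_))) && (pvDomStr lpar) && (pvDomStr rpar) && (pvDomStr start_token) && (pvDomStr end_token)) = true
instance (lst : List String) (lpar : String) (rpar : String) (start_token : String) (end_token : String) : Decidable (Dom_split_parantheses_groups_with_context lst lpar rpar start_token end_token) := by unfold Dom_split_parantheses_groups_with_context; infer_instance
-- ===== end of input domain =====

-- B replaces A's single accumulating pass by a repeated find-first-boundary-then-split decomposition; objective: alternative (same cost).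

-- ===== PORT A =====
-- the for-loop of A: state (new_list, sub_list, opened_par, opened_tokens)
def pvALoop (lpar rpar stok etok : String) : List String → List (List String) → List String → Int → Int → (List (List String) × List String)
  | [], nl, sl, _, _ => (nl, sl)
  | e :: t, nl, sl, op, ot =>
    let sl' := sl ++ [e]
    if e = stok then pvALoop lpar rpar stok etok t nl sl' op (ot + 1)
    else if e = etok then pvALoop lpar rpar stok etok t nl sl' op (ot - 1)
    else if e = lpar then pvALoop lpar rpar stok etok t nl sl' (op + 1) ot
    else if e = rpar then
      if op - 1 = 0 ∧ ot = 0 then pvALoop lpar rpar stok etok t (nl ++ [sl']) [] (op - 1) ot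
      else pvALoop lpar rpar stok etok t nl sl' (op - 1) ot
    else pvALoop lpar rpar stok etok t nl sl' op ot

def split_parantheses_groups_with_context (lst : List String) (lpar : String) (rpar : String) (start_token : String) (end_token : String) : List (List String) :=
  let p := pvALoop lpar rpar start_token end_token lst [] [] 0 0
  if p.2.length > 0 then p.1 ++ [p.2] else p.1

-- ===== PORT B =====
-- first_cut of Source B: the indexed scan, returning i+1 at the first closing boundary
def pvFirstCut (lpar rpar stok etok : String) : List String → Nat → Int → Int → Option Nat
  | [], _, _, _ => none
  | e :: t, i, op, ot =>
    if e = stok then pvFirstCut lpar rpar stok etok t (i + 1) op (ot + 1)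
    else if e = etok then pvFirstCut lpar rpar stok etok t (i + 1) op (ot - 1)
    else if e = lpar then pvFirstCut lpar rpar stok etok t (i + 1) (op + 1) ot
    else if e = rpar then
      if op - 1 = 0 ∧ ot = 0 then some (i + 1)
      else pvFirstCut lpar rpar stok etok t (i + 1) (op - 1) ot
    else pvFirstCut lpar rpar stok etok t (i + 1) op ot

-- needed by pvBSplit's termination: a cut index is at least 1 past the scan start
theorem pvFirstCut_pos (lpar rpar stok etok : String) :
    ∀ (xs : List String) (i : Nat) (op ot : Int) (k : Nat),
      pvFirstCut lpar rpar stok etok xs i op ot = some k → i < k := by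
  intro xs
  induction xs with
  | nil => intro i op ot k h; simp [pvFirstCut] at h
  | cons e t ih =>
    intro i op ot k h
    simp only [pvFirstCut] at h
    split_ifs at h with h1 h2 h3 h4 h5
    · exact Nat.lt_of_succ_lt (ih _ _ _ _ h)
    · exact Nat.lt_of_succ_lt (ih _ _ _ _ h)
    · exact Nat.lt_of_succ_lt (ih _ _ _ _ h)
    · cases h; omega
    · exact Nat.lt_of_succ_lt (ih _ _ _ _ h)
    · exact Nat.lt_of_succ_lt (ih _ _ _ _ h)

-- the while-loop of Source B: take the first group, recurse on the remainder
def pvBSplit (lpar rpar stok etok : String) : List String → List (List String)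
  | [] => []
  | e :: t =>
    match h : pvFirstCut lpar rpar stok etok (e :: t) 0 0 0 with
    | none => [e :: t]
    | some k => (e :: t).take k :: pvBSplit lpar rpar stok etok ((e :: t).drop k)
termination_by l => l.length
decreasing_by
  have hk := pvFirstCut_pos lpar rpar stok etok (e :: t) 0 0 0 k h
  simp [List.length_drop]; omega

def split_parantheses_groups_with_context_alt (lst : List String) (lpar : String) (rpar : String) (start_token : String) (end_token : String) : List (List String) :=
  pvBSplit lpar rpar start_token end_token lst

-- ===== PRECONDITION & SPEC =====
def Spec_split_parantheses_groups_with_context (lst : List String) (lpar : String) (rpar : String) (start_token : String) (end_token : String) (out : List (List String)) : Prop := out = split_parantheses_groups_with_context_alt lst lpar rpar start_token end_token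
instance (lst : List String) (lpar : String) (rpar : String) (start_token : String) (end_token : String) (out : List (List String)) : Decidable (Spec_split_parantheses_groups_with_context lst lpar rpar start_token end_token out) := by unfold Spec_split_parantheses_groups_with_context; infer_instance

-- ===== CLAIM (what is proved, stated in full; the proofs are below) =====
def Claim_equal_split_parantheses_groups_with_context : Prop := ∀ (lst : List String) (lpar : String) (rpar : String) (start_token : String) (end_token : String), Dom_split_parantheses_groups_with_context lst lpar rpar start_token end_token → Spec_split_parantheses_groups_with_context lst lpar rpar start_token end_token (split_parantheses_groups_with_context lst lpar rpar start_token end_token)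

-- ===== LEMMAS AND PROOFS =====

-- A's final flush, named so proofs can treat it as one step
def pvAFin (p : List (List String) × List String) : List (List String) :=
  if p.2.length > 0 then p.1 ++ [p.2] else p.1

-- mid-level description of the grouping: current group `sub`, remaining input, the two counters
def pvG (lpar rpar stok etok : String) : List String → List String → Int → Int → List (List String)
  | sub, [], _, _ => if sub.length > 0 then [sub] else []
  | sub, e :: t, op, ot =>
    let sub' := sub ++ [e]
    if e = stok then pvG lpar rpar stok etok sub' t op (ot + 1)
    else if e = etok then pvG lpar rpar stok etok sub' t op (ot - 1)
    else if e = lpar then pvG lpar rpar stok etok sub' t (op + 1) ot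
    else if e = rpar then
      if op - 1 = 0 ∧ ot = 0 then sub' :: pvG lpar rpar stok etok [] t (op - 1) ot
      else pvG lpar rpar stok etok sub' t (op - 1) ot
    else pvG lpar rpar stok etok sub' t op ot

-- A's loop + final flush equals the mid-level description
theorem pvALoop_eq_pvG (lpar rpar stok etok : String) :
    ∀ (t : List String) (nl : List (List String)) (sl : List String) (op ot : Int),
      pvAFin (pvALoop lpar rpar stok etok t nl sl op ot)
      = nl ++ pvG lpar rpar stok etok sl t op ot := by
  intro t
  induction t with
  | nil =>
    intro nl sl op ot
    simp only [pvALoop, pvG, pvAFin]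
    split_ifs <;> simp
  | cons e t ih =>
    intro nl sl op ot
    simp only [pvALoop, pvG]
    split_ifs with h1 h2 h3 h4 h5
    · exact ih ..
    · exact ih ..
    · exact ih ..
    · rw [ih]; simp
    · exact ih ..
    · exact ih ..

-- shifting the scan index of first_cut by one
theorem pvFirstCut_succ (lpar rpar stok etok : String) :
    ∀ (xs : List String) (i : Nat) (op ot : Int),
      pvFirstCut lpar rpar stok etok xs (i + 1) op ot
        = (pvFirstCut lpar rpar stok etok xs i op ot).map (· + 1) := by
  intro xs
  induction xs with
  | nil => intro i op ot; simp [pvFirstCut]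
  | cons e t ih =>
    intro i op ot
    simp only [pvFirstCut]
    split_ifs <;> simp [ih]

-- instance of the shift at the indices the proofs meet
theorem pvFirstCut_one (lpar rpar stok etok : String) (xs : List String) (op ot : Int) :
    pvFirstCut lpar rpar stok etok xs 1 op ot
      = (pvFirstCut lpar rpar stok etok xs 0 op ot).map (· + 1) :=
  pvFirstCut_succ lpar rpar stok etok xs 0 op ot

-- no boundary: everything is one trailing group
theorem pvG_of_none (lpar rpar stok etok : String) :
    ∀ (t : List String) (sub : List String) (op ot : Int),
      pvFirstCut lpar rpar stok etok t 0 op ot = none →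
      pvG lpar rpar stok etok sub t op ot
        = if (sub ++ t).length > 0 then [sub ++ t] else [] := by
  intro t
  induction t with
  | nil => intro sub op ot _; simp [pvG]
  | cons e t ih =>
    intro sub op ot h
    have hlen : (sub ++ e :: t).length > 0 := by
      simp only [List.length_append, List.length_cons]; omega
    rw [if_pos hlen]
    simp only [pvFirstCut] at h
    simp only [pvG]
    split_ifs at h ⊢ with h1 h2 h3 h4 h5
    all_goals
      (rw [pvFirstCut_one] at h
       rw [Option.map_eq_none_iff] at h
       rw [ih _ _ _ h]
       have hl : ((sub ++ [e]) ++ t).length > 0 := by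
         simp only [List.length_append, List.length_cons]; omega
       rw [if_pos hl]
       simp)

-- a boundary at k: the group is the first k elements, then restart with zero counters
theorem pvG_of_some (lpar rpar stok etok : String) :
    ∀ (t : List String) (sub : List String) (op ot : Int) (k : Nat),
      pvFirstCut lpar rpar stok etok t 0 op ot = some k →
      pvG lpar rpar stok etok sub t op ot
        = (sub ++ t.take k) :: pvG lpar rpar stok etok [] (t.drop k) 0 0 := by
  intro t
  induction t with
  | nil => intro sub op ot k h; simp [pvFirstCut] at h
  | cons e t ih =>
    intro sub op ot k h
    simp only [pvFirstCut] at h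
    simp only [pvG]
    split_ifs at h ⊢ with h1 h2 h3 h4 h5
    all_goals first
      | -- the cut branch: k = 1, counters are (0, 0)
        (have hk : k = 1 := by simpa using h.symm
         subst hk
         obtain ⟨hop, hot⟩ := h5
         simp [hop, hot])
      | -- recursive branches
        (rw [pvFirstCut_one] at h
         cases hfc : pvFirstCut lpar rpar stok etok t 0 _ _ with
         | none => rw [hfc] at h; simp at h
         | some m =>
           rw [hfc] at h
           simp only [Option.map_some] at h
           cases h
           rw [ih _ _ _ _ hfc]
           simp)

-- the mid-level description equals B's repeated-split loop
theorem pvG_eq_pvBSplit (lpar rpar stok etok : String) :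
    ∀ (rest : List String), pvG lpar rpar stok etok [] rest 0 0 = pvBSplit lpar rpar stok etok rest := by
  intro rest
  induction rest using pvBSplit.induct lpar rpar stok etok with
  | case1 => simp [pvG, pvBSplit]
  | case2 e t h =>
    rw [pvBSplit, h, pvG_of_none lpar rpar stok etok _ _ _ _ h]
    simp
  | case3 e t k h ih =>
    rw [pvBSplit, h, pvG_of_some lpar rpar stok etok _ _ _ _ _ h]
    simp [ih]

-- ===== VERDICT (by name: the statement is the Claim_ definition above) =====
theorem split_parantheses_groups_with_context_spec : Claim_equal_split_parantheses_groups_with_context := by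
  intro lst lpar rpar stok etok _
  unfold Spec_split_parantheses_groups_with_context split_parantheses_groups_with_context split_parantheses_groups_with_context_alt
  have := pvALoop_eq_pvG lpar rpar stok etok lst [] [] 0 0
  simp only [pvAFin] at this
  rw [this]
  simp [pvG_eq_pvBSplit]
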